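-- pv_equiv track=rewrite | github.com/Metta-AI/metta | sim/eval/data.py | create_eval_hierarchy
-- ===== SOURCE A (Python) =====
-- from typing import Dict, Any, List, Optional, Set, Tuple, Union
-- from collections import defaultdict
--
-- def create_eval_hierarchy(eval_names: Set[str]) -> Dict[str, List[str]]:
--     """
--     Create a hierarchical structure for evaluations based on path components.
--
--     Args:
--         eval_names: Set of evaluation names
--
--     Returns:
--         Dictionary mapping evaluation categories to lists of evaluation names
--     """
--     hierarchy = defaultdict(list)
--
--     for eval_name in eval_names:
--         # Split by path separator and use first component as category
--         components = eval_name.split('/')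
--         if len(components) > 1:
--             category = components[0]
--         else:
--             category = 'uncategorized'
--
--         hierarchy[category].append(eval_name)
--
--     # Sort evaluations within each category for consistent ordering
--     for category in hierarchy:
--         hierarchy[category].sort()
--
--     return dict(hierarchy)
-- ===== SOURCE B (Python) =====
-- def _category(name):
--     components = name.split('/')
--     return components[0] if len(components) > 1 else 'uncategorized'
--
--
-- def create_eval_hierarchy(eval_names):
--     """Register the categories in encounter order, then fill the groups in ONE pass
--     over the globally sorted names: each group arrives already sorted, so no
--     per-category sorting phase is needed."""
--     hierarchy = {}
--     for eval_name in eval_names: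
--         hierarchy[_category(eval_name)] = []
--     for eval_name in sorted(eval_names):
--         hierarchy[_category(eval_name)].append(eval_name)
--     return hierarchy
-- ===== Notes on version B (the rewrite author's own statement) =====
-- stated objective: alternative
-- what changed: B sorts the whole input once and then fills the groups in a single pass over that sorted list (after priming the category keys in encounter order), so each group is built already sorted and A's per-category sorting phase disappears.
import Mathlib
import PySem

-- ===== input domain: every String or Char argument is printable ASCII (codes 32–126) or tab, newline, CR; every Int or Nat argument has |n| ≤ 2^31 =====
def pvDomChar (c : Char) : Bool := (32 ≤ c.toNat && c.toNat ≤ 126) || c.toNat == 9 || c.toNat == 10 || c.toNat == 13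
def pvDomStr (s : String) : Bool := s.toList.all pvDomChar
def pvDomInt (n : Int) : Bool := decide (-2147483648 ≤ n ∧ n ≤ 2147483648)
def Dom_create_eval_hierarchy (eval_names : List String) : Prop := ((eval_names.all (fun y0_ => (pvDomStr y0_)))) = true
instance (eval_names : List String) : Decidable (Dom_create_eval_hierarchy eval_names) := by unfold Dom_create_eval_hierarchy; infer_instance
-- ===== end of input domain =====

-- B sorts the whole input once and fills the groups in one pass over that sorted
-- list (keys primed in encounter order), replacing A's append-then-sort-each-group phases.

-- shared trivial helper: the category of a name (first '/'-component, or 'uncategorized')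
def pvCategory (name : String) : String :=
  let components := (PySem.Str.split? name "/").getD []
  if components.length > 1 then components.headD "" else "uncategorized"

-- ===== PORT A =====
def create_eval_hierarchy (eval_names : List String) : List (String × List String) :=
  let hierarchy := eval_names.foldl
    (fun d name => d.modify (pvCategory name) [] (fun g => g ++ [name]))
    PySem.Dict.empty
  let sortedD := hierarchy.keys.foldl
    (fun d category => d.modify category [] (fun g => PySem.List.sorted g (fun x => x)))
    hierarchy
  sortedD.items

-- ===== PORT B =====
def create_eval_hierarchy_alt (eval_names : List String) : List (String × List String) :=
  -- first loop: hierarchy[_category(name)] = []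
  let hierarchy := eval_names.foldl
    (fun d name => d.insert (pvCategory name) [])
    PySem.Dict.empty
  -- second loop over sorted(eval_names): hierarchy[_category(name)].append(name)
  -- (the key is always present, so d[k].append(v) is d[k] = d.get(k, []) + [v])
  let filled := (PySem.List.sorted eval_names (fun x => x)).foldl
    (fun d name => d.modify (pvCategory name) [] (fun g => g ++ [name]))
    hierarchy
  filled.items

-- ===== PRECONDITION & SPEC =====
def Spec_create_eval_hierarchy (eval_names : List String) (out : List (String × List String)) : Prop := out = create_eval_hierarchy_alt eval_names
instance (eval_names : List String) (out : List (String × List String)) : Decidable (Spec_create_eval_hierarchy eval_names out) := by unfold Spec_create_eval_hierarchy; infer_instance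

-- ===== CLAIM (what is proved, stated in full; the proofs are below) =====
def Claim_equal_create_eval_hierarchy : Prop := ∀ (eval_names : List String), Dom_create_eval_hierarchy eval_names → Spec_create_eval_hierarchy eval_names (create_eval_hierarchy eval_names)

-- ===== LEMMAS AND PROOFS =====

-- the grouping loop of either side: the value stored at c collects, in traversal
-- order, exactly the names whose category is c
theorem getD_foldl_modify_append_cat (l : List String) (d : PySem.Dict String (List String)) (c : String) :
    (l.foldl (fun d n => d.modify (pvCategory n) [] (fun g => g ++ [n])) d).getD c []
      = d.getD c [] ++ l.filter (fun n => pvCategory n == c) := by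
  induction l generalizing d with
  | nil => simp
  | cons n l ih =>
    simp only [List.foldl_cons, List.filter_cons, ih]
    by_cases h : pvCategory n = c
    · simp [h]
    · simp [h, PySem.Dict.getD_modify, Ne.symm h]

-- B's priming loop stores [] everywhere, so every lookup with default [] gives []
theorem getD_foldl_insert_nil (l : List String) (d : PySem.Dict String (List String)) (c : String) :
    (l.foldl (fun d n => d.insert (pvCategory n) []) d).getD c []
      = if c ∈ l.map pvCategory then [] else d.getD c [] := by
  induction l generalizing d with
  | nil => simp
  | cons n l ih =>
    simp only [List.foldl_cons, List.map_cons, List.mem_cons, ih]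
    by_cases h : c = pvCategory n
    · simp [h]
    · simp [h, PySem.Dict.getD_insert]

-- A's second phase: after sorting every key of ks, the value at c ∈ ks is sorted
theorem getD_foldl_modify_sort (ks : List String) (d : PySem.Dict String (List String)) (c : String) :
    (ks.foldl (fun d k => d.modify k [] (fun g => PySem.List.sorted g (fun x => x))) d).getD c []
      = if c ∈ ks then PySem.List.sorted (d.getD c []) (fun x => x) else d.getD c [] := by
  induction ks generalizing d with
  | nil => simp
  | cons k ks ih =>
    simp only [List.foldl_cons, ih, List.mem_cons, PySem.Dict.getD_modify]
    by_cases h : c = k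
    · simp [h, PySem.List.sorted_sorted]
    · simp [h]

-- updating a set with elements it already has changes nothing
theorem set_update_of_mem (s : PySem.Set String) (l : List String) (h : ∀ x ∈ l, x ∈ s) :
    PySem.Set.update s l = s := by
  rw [PySem.Set.update_eq_append_filter]
  have hf : (PySem.Set.ofList l).filter (fun y => !(PySem.Set.contains s y)) = [] := by
    apply List.filter_eq_nil_iff.mpr
    intro y hy
    have hm : y ∈ s := h y ((PySem.Set.mem_ofList l y).mp hy)
    simpa using hm
  rw [hf, List.append_nil]

-- filtering commutes with the global sort: a filtered sorted list is the sorted filtered list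
theorem sorted_filter (xs : List String) (p : String → Bool) :
    PySem.List.sorted (xs.filter p) (fun x => x)
      = (PySem.List.sorted xs (fun x => x)).filter p := by
  apply PySem.List.sorted_id_eq_of_perm_of_pairwise
  · exact (PySem.List.sorted_perm xs (fun x => x) false).filter p
  · exact (PySem.List.sorted_pairwise xs (fun x => x)).filter p

theorem create_eval_hierarchy_spec : Claim_equal_create_eval_hierarchy := by
  intro eval_names _
  unfold Spec_create_eval_hierarchy create_eval_hierarchy create_eval_hierarchy_alt
  set dA := eval_names.foldl
    (fun d name => d.modify (pvCategory name) [] (fun g => g ++ [name]))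
    PySem.Dict.empty with hdA
  set dS := dA.keys.foldl
    (fun d category => d.modify category [] (fun g => PySem.List.sorted g (fun x => x)))
    dA with hdS
  set d0 := eval_names.foldl
    (fun d name => d.insert (pvCategory name) [])
    PySem.Dict.empty with hd0
  set dB := (PySem.List.sorted eval_names (fun x => x)).foldl
    (fun d name => d.modify (pvCategory name) [] (fun g => g ++ [name]))
    d0 with hdB
  -- key lists: every dict involved has the distinct categories in first-occurrence order
  have hKA : dA.keys = PySem.Set.ofList (eval_names.map pvCategory) := by
    rw [hdA, PySem.Dict.keys_foldl_modify_key eval_names pvCategory [] (fun _ n g => g ++ [n])]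
    exact PySem.Set.update_nil_left _
  have hK0 : d0.keys = PySem.Set.ofList (eval_names.map pvCategory) := by
    rw [hd0, PySem.Dict.keys_foldl_insert_key eval_names pvCategory (fun _ _ => [])]
    exact PySem.Set.update_nil_left _
  have hKS : dS.keys = dA.keys := by
    rw [hdS, PySem.Dict.keys_foldl_modify dA.keys [] (fun _ _ g => PySem.List.sorted g (fun x => x)) dA]
    exact set_update_of_mem dA.keys dA.keys (fun _ hx => hx)
  have hKB : dB.keys = PySem.Set.ofList (eval_names.map pvCategory) := by
    rw [hdB, PySem.Dict.keys_foldl_modify_key _ pvCategory [] (fun _ n g => g ++ [n]), hK0]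
    apply set_update_of_mem
    intro x hx
    rcases List.mem_map.mp hx with ⟨n, hn, rfl⟩
    exact (PySem.Set.mem_ofList _ _).mpr
      (List.mem_map_of_mem ((PySem.List.mem_sorted eval_names (fun x => x) false n).mp hn))
  have hndS : dS.keys.Nodup := by rw [hKS, hKA]; exact PySem.Set.nodup_ofList _
  have hndB : dB.keys.Nodup := by rw [hKB]; exact PySem.Set.nodup_ofList _
  -- both results are maps over the same key list; compare values pointwise
  rw [PySem.Dict.items_eq_map_keys dS hndS [], PySem.Dict.items_eq_map_keys dB hndB [],
      hKS, hKA, hKB]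
  apply List.map_congr_left
  intro c hc
  have hcmem : c ∈ dA.keys := by rw [hKA]; exact hc
  have hA : dA.getD c [] = eval_names.filter (fun n => pvCategory n == c) := by
    rw [hdA, getD_foldl_modify_append_cat]
    simp
  have hS : dS.getD c []
      = PySem.List.sorted (eval_names.filter (fun n => pvCategory n == c)) (fun x => x) := by
    rw [hdS, getD_foldl_modify_sort, if_pos hcmem, hA]
  have hB : dB.getD c []
      = PySem.List.sorted (eval_names.filter (fun n => pvCategory n == c)) (fun x => x) := by
    rw [hdB, getD_foldl_modify_append_cat, hd0, getD_foldl_insert_nil, sorted_filter]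
    simp [PySem.Dict.getD_empty]
  simp [hS, hB]
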